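-- pv_equiv track=rewrite | github.com/Tomas-Romero/Paradigmas-Programacion | Practico de Repaso/practico_repaso_romero.py | Ejercicio4
-- ===== SOURCE A (Python) =====
-- lista = []
--
-- def Ejercicio4(lista):
--     palabra = ""
--     longitud_par = 0
--     palabras = []
--     caracteres = [" ", ",", "?", "!", "-", "\n"]
--     for caracter in lista:
--         if  caracter not in caracteres:
--             palabra += caracter
--         else:
--             palabras.append(palabra)
--             palabra = ""
--     for elemento in palabras:
--         if (len(elemento) % 2 == 0) and (len(elemento) != 0):
--             longitud_par += 1
--     return longitud_par
-- ===== SOURCE B (Python) =====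
-- def Ejercicio4(lista):
--     # one pass: track only the running word length; count when a delimiter closes a word
--     delimitadores = {" ", ",", "?", "!", "-", "\n"}
--     contador = 0
--     largo = 0
--     for caracter in lista:
--         if caracter in delimitadores:
--             if largo > 0 and largo % 2 == 0:
--                 contador += 1
--             largo = 0
--         else:
--             largo += len(caracter)
--     return contador
-- ===== Notes on version B (the rewrite author's own statement) =====
-- stated objective: simpler
-- what changed: B replaces A's two-phase tokenize-then-count (building the word string and the list of words) with a single pass that keeps only the running word length and increments a counter when a delimiter closes a nonempty even-length word.
import Mathlib
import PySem

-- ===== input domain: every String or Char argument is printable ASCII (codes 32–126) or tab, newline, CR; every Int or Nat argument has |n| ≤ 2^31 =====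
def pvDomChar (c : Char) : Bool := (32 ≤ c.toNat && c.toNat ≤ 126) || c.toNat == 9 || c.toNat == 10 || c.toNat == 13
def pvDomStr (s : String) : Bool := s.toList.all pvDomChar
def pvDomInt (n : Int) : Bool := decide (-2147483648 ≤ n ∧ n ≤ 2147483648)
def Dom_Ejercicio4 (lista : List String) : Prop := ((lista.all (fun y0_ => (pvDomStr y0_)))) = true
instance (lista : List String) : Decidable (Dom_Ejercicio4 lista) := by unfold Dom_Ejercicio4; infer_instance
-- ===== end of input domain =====

-- B replaces A's two-phase tokenize-then-count with a single pass keeping only the running word length.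


-- ===== PORT A =====
-- words are kept as List Char (PySem string convention); palabra += caracter is list append
def pvDelims : List String := [" ", ",", "?", "!", "-", "\n"]

def pvStepA (s : List Char × List (List Char)) (caracter : String) : List Char × List (List Char) :=
  if caracter ∈ pvDelims then ([], s.2 ++ [s.1]) else (s.1 ++ caracter.toList, s.2)

def Ejercicio4 (lista : List String) : Int :=
  let st := lista.foldl pvStepA ([], [])
  st.2.foldl (fun longitud_par elemento =>
    if elemento.length % 2 == 0 && elemento.length != 0 then longitud_par + 1 else longitud_par) 0

-- ===== PORT B =====
-- B's delimiter set (a Python set of the six one-char strings)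
def pvDelimsB : PySem.Set String := PySem.Set.ofList [" ", ",", "?", "!", "-", "\n"]

def pvStepB (s : Int × Nat) (caracter : String) : Int × Nat :=
  if caracter ∈ pvDelimsB then
    (if 0 < s.2 && s.2 % 2 == 0 then s.1 + 1 else s.1, 0)
  else (s.1, s.2 + caracter.toList.length)

def Ejercicio4_alt (lista : List String) : Int :=
  (lista.foldl pvStepB (0, 0)).1

-- ===== PRECONDITION & SPEC =====
def Spec_Ejercicio4 (lista : List String) (out : Int) : Prop := out = Ejercicio4_alt lista
instance (lista : List String) (out : Int) : Decidable (Spec_Ejercicio4 lista out) := by unfold Spec_Ejercicio4; infer_instance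

-- ===== CLAIM (what is proved, stated in full; the proofs are below) =====
def Claim_equal_Ejercicio4 : Prop := ∀ (lista : List String), Dom_Ejercicio4 lista → Spec_Ejercicio4 lista (Ejercicio4 lista)

-- ===== LEMMAS AND PROOFS =====

-- A's second loop, as a function of the word list
def pvCount2 (palabras : List (List Char)) (acc : Int) : Int :=
  palabras.foldl (fun longitud_par elemento =>
    if elemento.length % 2 == 0 && elemento.length != 0 then longitud_par + 1 else longitud_par) acc

theorem pvCount2_append (xs : List (List Char)) (w : List Char) (acc : Int) :
    pvCount2 (xs ++ [w]) acc
      = pvCount2 xs acc + (if w.length % 2 == 0 && w.length != 0 then 1 else 0) := by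
  simp [pvCount2, List.foldl_append]
  split <;> simp

theorem pvCond_bool (n : Nat) : (n % 2 == 0 && n != 0) = (0 < n && n % 2 == 0) := by
  cases h : (n % 2 == 0) <;> cases h0 : (n != 0) <;> simp_all <;> try omega

theorem pvKey (lista : List String) (palabra : List Char) (palabras : List (List Char)) :
    pvCount2 (lista.foldl pvStepA (palabra, palabras)).2 0
      = (lista.foldl pvStepB (pvCount2 palabras 0, palabra.length)).1 := by
  induction lista generalizing palabra palabras with
  | nil => simp
  | cons c cs ih =>
    simp only [List.foldl_cons, pvStepA, pvStepB]
    have hmem : (c ∈ pvDelimsB) ↔ (c ∈ pvDelims) := by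
      simp [pvDelimsB, pvDelims, PySem.Set.mem_ofList]
    by_cases h : c ∈ pvDelims
    · simp only [h, hmem, if_pos]
      rw [ih]
      have hcnt : pvCount2 (palabras ++ [palabra]) 0
          = (if 0 < palabra.length && palabra.length % 2 == 0
             then pvCount2 palabras 0 + 1 else pvCount2 palabras 0) := by
        rw [pvCount2_append, pvCond_bool]; split <;> simp
      rw [hcnt]; simp
    · simp only [h, hmem, if_neg, not_false_iff]
      rw [ih]
      simp

-- ===== VERDICT (by name: the statement is the Claim_ definition above) =====
theorem Ejercicio4_spec : Claim_equal_Ejercicio4 := by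
  intro lista _
  show Ejercicio4 lista = Ejercicio4_alt lista
  unfold Ejercicio4 Ejercicio4_alt
  have := pvKey lista [] []
  simpa [pvCount2] using this
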